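-- pv_equiv track=rewrite | github.com/berkeleybop/metpo | metpo/scripts/audit_id_allocation.py | classify_burned
-- ===== SOURCE A (Python) =====
-- def classify_burned(burned_ids: set[str]) -> dict[str, list[str]]:
--     """Classify burned IDs by era."""
--     return {
--         "era1": sorted(i for i in burned_ids if len(i) == 6 and i.startswith("0")),
--         "era2": sorted(i for i in burned_ids if len(i) == 7 and i.startswith("0")),
--         "era3_classes": sorted(i for i in burned_ids if i.startswith("1")),
--         "era3_props": sorted(i for i in burned_ids if i.startswith("2")),
--         "test": sorted(i for i in burned_ids if i.startswith("9")),
--     }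
-- ===== SOURCE B (Python) =====
-- def classify_burned(burned_ids: set[str]) -> dict[str, list[str]]:
--     """Classify burned IDs by era (single partitioning pass, then sort each bucket)."""
--     era1, era2, era3_classes, era3_props, test = [], [], [], [], []
--     for i in burned_ids:
--         if i.startswith("0") and len(i) == 6:
--             era1.append(i)
--         elif i.startswith("0") and len(i) == 7:
--             era2.append(i)
--         elif i.startswith("1"):
--             era3_classes.append(i)
--         elif i.startswith("2"):
--             era3_props.append(i)
--         elif i.startswith("9"):
--             test.append(i)
--     era1.sort()
--     era2.sort()
--     era3_classes.sort()
--     era3_props.sort()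
--     test.sort()
--     return {
--         "era1": era1,
--         "era2": era2,
--         "era3_classes": era3_classes,
--         "era3_props": era3_props,
--         "test": test,
--     }
-- ===== Notes on version B (the rewrite author's own statement) =====
-- stated objective: alternative
-- what changed: Replaces five full rescans of the input (one generator expression per era) with a single partitioning pass using an if/elif chain into five accumulator lists, sorted after the loop.
import Mathlib
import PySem

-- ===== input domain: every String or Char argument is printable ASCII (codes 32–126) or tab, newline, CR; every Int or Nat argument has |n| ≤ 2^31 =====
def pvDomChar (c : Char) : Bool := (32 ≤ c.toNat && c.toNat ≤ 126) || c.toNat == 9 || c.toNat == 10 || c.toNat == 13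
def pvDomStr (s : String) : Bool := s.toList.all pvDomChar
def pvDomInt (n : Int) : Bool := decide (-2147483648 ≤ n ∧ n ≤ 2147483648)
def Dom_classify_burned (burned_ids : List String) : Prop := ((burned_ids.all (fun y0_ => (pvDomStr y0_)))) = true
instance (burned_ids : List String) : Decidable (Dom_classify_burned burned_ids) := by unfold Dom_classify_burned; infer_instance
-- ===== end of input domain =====

-- B replaces A's five full rescans of the input with one partitioning pass (if/elif chain) plus
-- a sort of each bucket afterwards; same return value, different decomposition.


-- ===== PORT A =====
-- five generator-expression filters, each sorted
def classify_burned (burned_ids : List String) : List (String × List String) :=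
  [ ("era1", PySem.List.sorted
      (burned_ids.filter (fun i => PySem.Str.len i == 6 && PySem.Str.startswith i "0")) (fun x => x)),
    ("era2", PySem.List.sorted
      (burned_ids.filter (fun i => PySem.Str.len i == 7 && PySem.Str.startswith i "0")) (fun x => x)),
    ("era3_classes", PySem.List.sorted
      (burned_ids.filter (fun i => PySem.Str.startswith i "1")) (fun x => x)),
    ("era3_props", PySem.List.sorted
      (burned_ids.filter (fun i => PySem.Str.startswith i "2")) (fun x => x)),
    ("test", PySem.List.sorted
      (burned_ids.filter (fun i => PySem.Str.startswith i "9")) (fun x => x)) ]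

-- ===== PORT B =====
-- one pass with an if/elif chain into five accumulators, then sort each bucket
def classify_burned_step
    (acc : List String × List String × List String × List String × List String)
    (i : String) :
    List String × List String × List String × List String × List String :=
  let (e1, e2, e3c, e3p, t) := acc
  if PySem.Str.startswith i "0" && (PySem.Str.len i == 6) then (e1 ++ [i], e2, e3c, e3p, t)
  else if PySem.Str.startswith i "0" && (PySem.Str.len i == 7) then (e1, e2 ++ [i], e3c, e3p, t)
  else if PySem.Str.startswith i "1" then (e1, e2, e3c ++ [i], e3p, t)
  else if PySem.Str.startswith i "2" then (e1, e2, e3c, e3p ++ [i], t)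
  else if PySem.Str.startswith i "9" then (e1, e2, e3c, e3p, t ++ [i])
  else (e1, e2, e3c, e3p, t)

def classify_burned_alt (burned_ids : List String) : List (String × List String) :=
  let acc := burned_ids.foldl classify_burned_step ([], [], [], [], [])
  let (e1, e2, e3c, e3p, t) := acc
  [ ("era1", PySem.List.sorted e1 (fun x => x)),
    ("era2", PySem.List.sorted e2 (fun x => x)),
    ("era3_classes", PySem.List.sorted e3c (fun x => x)),
    ("era3_props", PySem.List.sorted e3p (fun x => x)),
    ("test", PySem.List.sorted t (fun x => x)) ]

-- ===== PRECONDITION & SPEC =====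
def Spec_classify_burned (burned_ids : List String) (out : List (String × List String)) : Prop := out = classify_burned_alt burned_ids
instance (burned_ids : List String) (out : List (String × List String)) : Decidable (Spec_classify_burned burned_ids out) := by unfold Spec_classify_burned; infer_instance

-- ===== CLAIM (what is proved, stated in full; the proofs are below) =====
def Claim_equal_classify_burned : Prop := ∀ (burned_ids : List String), Dom_classify_burned burned_ids → Spec_classify_burned burned_ids (classify_burned burned_ids)

-- ===== LEMMAS AND PROOFS =====

-- a string starting with c does not start with d when c ≠ d
lemma startswith_single_excl (l : List Char) (c d : Char) (h : c ≠ d)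
    (h1 : PySem.Chars.startswith l [c] = true) :
    PySem.Chars.startswith l [d] = false := by
  by_contra hc
  rw [Bool.not_eq_false] at hc
  rw [PySem.Chars.startswith_iff] at h1 hc
  obtain ⟨t1, ht1⟩ := h1
  obtain ⟨t2, ht2⟩ := hc
  rw [← ht1] at ht2
  simp only [List.singleton_append, List.cons.injEq] at ht2
  exact h ht2.1.symm

-- the step function routes i into exactly the buckets A's five filters select
lemma classify_burned_step_eq (e1 e2 e3c e3p t : List String) (i : String) :
    classify_burned_step (e1, e2, e3c, e3p, t) i =
      (e1 ++ if PySem.Str.len i == 6 && PySem.Str.startswith i "0" then [i] else [],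
       e2 ++ (if PySem.Str.len i == 7 && PySem.Str.startswith i "0" then [i] else []),
       e3c ++ (if PySem.Str.startswith i "1" then [i] else []),
       e3p ++ (if PySem.Str.startswith i "2" then [i] else []),
       t ++ (if PySem.Str.startswith i "9" then [i] else [])) := by
  unfold classify_burned_step
  by_cases h0 : PySem.Chars.startswith i.toList ['0'] = true
  · have h1 := startswith_single_excl i.toList '0' '1' (by decide) h0
    have h2 := startswith_single_excl i.toList '0' '2' (by decide) h0
    have h9 := startswith_single_excl i.toList '0' '9' (by decide) h0
    by_cases h6 : ((i.length : Int) = 6)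
    · simp [h0, h6, h1, h2, h9]
    · by_cases h7 : ((i.length : Int) = 7) <;> simp [h0, h6, h7, h1, h2, h9]
  · rw [Bool.not_eq_true] at h0
    by_cases h1 : PySem.Chars.startswith i.toList ['1'] = true
    · have h2 := startswith_single_excl i.toList '1' '2' (by decide) h1
      have h9 := startswith_single_excl i.toList '1' '9' (by decide) h1
      simp [h0, h1, h2, h9]
    · rw [Bool.not_eq_true] at h1
      by_cases h2 : PySem.Chars.startswith i.toList ['2'] = true
      · have h9 := startswith_single_excl i.toList '2' '9' (by decide) h2
        simp [h0, h1, h2, h9]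
      · rw [Bool.not_eq_true] at h2
        by_cases h9 : PySem.Chars.startswith i.toList ['9'] = true
        · simp [h0, h1, h2, h9]
        · rw [Bool.not_eq_true] at h9
          simp [h0, h1, h2, h9]

-- the fold accumulates exactly A's five filters
lemma classify_burned_fold (xs : List String) (e1 e2 e3c e3p t : List String) :
    xs.foldl classify_burned_step (e1, e2, e3c, e3p, t) =
      (e1 ++ xs.filter (fun i => PySem.Str.len i == 6 && PySem.Str.startswith i "0"),
       e2 ++ xs.filter (fun i => PySem.Str.len i == 7 && PySem.Str.startswith i "0"),
       e3c ++ xs.filter (fun i => PySem.Str.startswith i "1"),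
       e3p ++ xs.filter (fun i => PySem.Str.startswith i "2"),
       t ++ xs.filter (fun i => PySem.Str.startswith i "9")) := by
  induction xs generalizing e1 e2 e3c e3p t with
  | nil => simp
  | cons x xs ih =>
    simp only [List.foldl_cons, classify_burned_step_eq, ih, List.filter_cons]
    by_cases c6 : ((x.length : Int) = 6) <;>
      by_cases c7 : ((x.length : Int) = 7) <;>
        by_cases s0 : PySem.Chars.startswith x.toList ['0'] = true <;>
          by_cases s1 : PySem.Chars.startswith x.toList ['1'] = true <;>
            by_cases s2 : PySem.Chars.startswith x.toList ['2'] = true <;>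
              by_cases s9 : PySem.Chars.startswith x.toList ['9'] = true <;>
                simp_all

-- ===== VERDICT (by name: the statement is the Claim_ definition above) =====
theorem classify_burned_spec : Claim_equal_classify_burned := by
  intro burned_ids _
  unfold Spec_classify_burned classify_burned classify_burned_alt
  rw [classify_burned_fold]
  simp
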